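-- pv_equiv track=rewrite | github.com/TrungXibia/ledaonuoi3mien | logic.py | hieu
-- ===== SOURCE A (Python) =====
-- def hieu(pair: str) -> int:
--     p = pair.zfill(2)
--     hieu_map = {
--         0:  ["00","11","22","33","44","55","66","77","88","99"],
--         1:  ["09","10","21","32","43","54","65","76","87","98"],
--         2:  ["08","19","20","31","42","53","64","75","86","97"],
--         3:  ["07","18","29","30","41","52","63","74","85","96"],
--         4:  ["06","17","28","39","40","51","62","73","84","95"],
--         5:  ["05","16","27","38","49","50","61","72","83","94"],
--         6:  ["04","15","26","37","48","59","60","71","82","93"],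
--         7:  ["03","14","25","36","47","58","69","70","81","92"],
--         8:  ["02","13","24","35","46","57","68","79","80","91"],
--         9:  ["01","12","23","34","45","56","67","78","89","90"],
--     }
--     for delay, nums in hieu_map.items():
--         if p in nums: return delay
--     return -1
-- ===== SOURCE B (Python) =====
-- def hieu(pair: str) -> int:
--     # closed form: delay = (first digit - second digit) mod 10 after zero-padding to width 2
--     if len(pair) == 0:
--         return 0                      # "" pads to "00"
--     if len(pair) == 1:
--         return (-int(pair)) % 10 if pair.isdigit() else -1
--     if len(pair) == 2 and pair[0].isdigit() and pair[1].isdigit():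
--         return (int(pair[0]) - int(pair[1])) % 10
--     return -1
-- ===== Notes on version B (the rewrite author's own statement) =====
-- stated objective: simpler
-- what changed: Replaced rebuilding a 100-entry dict of string lists and scanning it on every call by the closed form (first digit - second digit) mod 10 on the zero-padded input, with -1 when the padded string is not two digits.
import Mathlib
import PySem

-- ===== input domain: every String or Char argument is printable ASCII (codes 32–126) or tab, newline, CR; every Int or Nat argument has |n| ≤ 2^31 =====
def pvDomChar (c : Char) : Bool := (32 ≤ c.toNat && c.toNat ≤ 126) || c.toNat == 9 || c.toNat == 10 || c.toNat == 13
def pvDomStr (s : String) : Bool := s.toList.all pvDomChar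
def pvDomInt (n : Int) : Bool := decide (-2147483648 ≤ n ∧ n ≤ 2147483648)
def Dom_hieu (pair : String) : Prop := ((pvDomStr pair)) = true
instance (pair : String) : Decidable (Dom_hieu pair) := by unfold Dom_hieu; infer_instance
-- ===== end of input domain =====

-- B replaces A's 100-entry table rebuild and scan by the closed form (d0 - d1) mod 10 on the
-- zero-padded digits, with -1 when the padded string is not two digits (objective: simpler).


-- ===== PORT A =====
-- the dict literal, in insertion order, as its items list
def hieuMap : List (Int × List String) :=
  [(0, ["00","11","22","33","44","55","66","77","88","99"]),
   (1, ["09","10","21","32","43","54","65","76","87","98"]),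
   (2, ["08","19","20","31","42","53","64","75","86","97"]),
   (3, ["07","18","29","30","41","52","63","74","85","96"]),
   (4, ["06","17","28","39","40","51","62","73","84","95"]),
   (5, ["05","16","27","38","49","50","61","72","83","94"]),
   (6, ["04","15","26","37","48","59","60","71","82","93"]),
   (7, ["03","14","25","36","47","58","69","70","81","92"]),
   (8, ["02","13","24","35","46","57","68","79","80","91"]),
   (9, ["01","12","23","34","45","56","67","78","89","90"])]

-- 'for delay, nums in hieu_map.items(): if p in nums: return delay' / 'return -1'
def hieuScan (p : String) : List (Int × List String) → Int
  | [] => -1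
  | (delay, nums) :: rest => if nums.contains p then delay else hieuScan p rest

def hieu (pair : String) : Int :=
  hieuScan (PySem.Str.zfill pair 2) hieuMap

-- ===== PORT B =====
-- int(c) for a single digit character c
def hieuDigit (c : Char) : Int := (c.toNat : Int) - 48

def hieu_alt (pair : String) : Int :=
  match pair.toList with
  | [] => 0
  | [c] => if PySem.Chars.isdigit c then PySem.Int.mod (-(hieuDigit c)) 10 else -1
  | [c, d] => if PySem.Chars.isdigit c && PySem.Chars.isdigit d
              then PySem.Int.mod (hieuDigit c - hieuDigit d) 10 else -1
  | _ => -1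

-- ===== PRECONDITION & SPEC =====
def Spec_hieu (pair : String) (out : Int) : Prop := out = hieu_alt pair
instance (pair : String) (out : Int) : Decidable (Spec_hieu pair out) := by unfold Spec_hieu; infer_instance

-- ===== CLAIM (what is proved, stated in full; the proofs are below) =====
def Claim_equal_hieu : Prop := ∀ (pair : String), Dom_hieu pair → Spec_hieu pair (hieu pair)

-- ===== LEMMAS AND PROOFS =====

theorem char_eq_of_toNat_eq {c d : Char} (h : c.toNat = d.toNat) : c = d :=
  Char.ext (UInt32.toNat_inj.mp h)

theorem isdigit_elim (c : Char) (h : PySem.Chars.isdigit c = true) :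
    c = '0' ∨ c = '1' ∨ c = '2' ∨ c = '3' ∨ c = '4' ∨ c = '5' ∨ c = '6' ∨ c = '7' ∨ c = '8' ∨ c = '9' := by
  simp only [PySem.Chars.isdigit, Bool.and_eq_true, decide_eq_true_eq, Char.le_def,
    UInt32.le_iff_toNat_le] at h
  have e0 : '0'.val.toNat = 48 := rfl
  have e9 : '9'.val.toNat = 57 := rfl
  have heq : c.toNat = 48 ∨ c.toNat = 49 ∨ c.toNat = 50 ∨ c.toNat = 51 ∨ c.toNat = 52 ∨
      c.toNat = 53 ∨ c.toNat = 54 ∨ c.toNat = 55 ∨ c.toNat = 56 ∨ c.toNat = 57 := by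
    show c.val.toNat = 48 ∨ c.val.toNat = 49 ∨ c.val.toNat = 50 ∨ c.val.toNat = 51 ∨ c.val.toNat = 52 ∨
      c.val.toNat = 53 ∨ c.val.toNat = 54 ∨ c.val.toNat = 55 ∨ c.val.toNat = 56 ∨ c.val.toNat = 57
    omega
  rcases heq with h'|h'|h'|h'|h'|h'|h'|h'|h'|h'
  · exact Or.inl (char_eq_of_toNat_eq (d := '0') h')
  · exact Or.inr (Or.inl (char_eq_of_toNat_eq (d := '1') h'))
  · exact Or.inr (Or.inr (Or.inl (char_eq_of_toNat_eq (d := '2') h')))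
  · exact Or.inr (Or.inr (Or.inr (Or.inl (char_eq_of_toNat_eq (d := '3') h'))))
  · exact Or.inr (Or.inr (Or.inr (Or.inr (Or.inl (char_eq_of_toNat_eq (d := '4') h')))))
  · exact Or.inr (Or.inr (Or.inr (Or.inr (Or.inr (Or.inl (char_eq_of_toNat_eq (d := '5') h'))))))
  · exact Or.inr (Or.inr (Or.inr (Or.inr (Or.inr (Or.inr (Or.inl (char_eq_of_toNat_eq (d := '6') h')))))))
  · exact Or.inr (Or.inr (Or.inr (Or.inr (Or.inr (Or.inr (Or.inr (Or.inl (char_eq_of_toNat_eq (d := '7') h'))))))))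
  · exact Or.inr (Or.inr (Or.inr (Or.inr (Or.inr (Or.inr (Or.inr (Or.inr (Or.inl (char_eq_of_toNat_eq (d := '8') h')))))))))
  · exact Or.inr (Or.inr (Or.inr (Or.inr (Or.inr (Or.inr (Or.inr (Or.inr (Or.inr (char_eq_of_toNat_eq (d := '9') h')))))))))

-- the scan returns -1 on any two-char string whose second char is not a digit
theorem scan_snd_not_digit (a c : Char) (h : PySem.Chars.isdigit c = false) :
    hieuScan (String.ofList [a, c]) hieuMap = -1 := by
  simp only [PySem.Chars.isdigit, Bool.and_eq_false_iff,
    decide_eq_false_iff_not, not_le] at h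
  have n0 : c ≠ '0' := by rintro rfl; revert h; decide
  have n1 : c ≠ '1' := by rintro rfl; revert h; decide
  have n2 : c ≠ '2' := by rintro rfl; revert h; decide
  have n3 : c ≠ '3' := by rintro rfl; revert h; decide
  have n4 : c ≠ '4' := by rintro rfl; revert h; decide
  have n5 : c ≠ '5' := by rintro rfl; revert h; decide
  have n6 : c ≠ '6' := by rintro rfl; revert h; decide
  have n7 : c ≠ '7' := by rintro rfl; revert h; decide
  have n8 : c ≠ '8' := by rintro rfl; revert h; decide
  have n9 : c ≠ '9' := by rintro rfl; revert h; decide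
  simp [hieuScan, hieuMap, ← String.toList_inj, n0, n1, n2, n3, n4, n5, n6, n7, n8, n9]

-- the scan returns -1 on any two-char string whose first char is not a digit
theorem scan_fst_not_digit (a c : Char) (h : PySem.Chars.isdigit a = false) :
    hieuScan (String.ofList [a, c]) hieuMap = -1 := by
  simp only [PySem.Chars.isdigit, Bool.and_eq_false_iff,
    decide_eq_false_iff_not, not_le] at h
  have n0 : a ≠ '0' := by rintro rfl; revert h; decide
  have n1 : a ≠ '1' := by rintro rfl; revert h; decide
  have n2 : a ≠ '2' := by rintro rfl; revert h; decide
  have n3 : a ≠ '3' := by rintro rfl; revert h; decide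
  have n4 : a ≠ '4' := by rintro rfl; revert h; decide
  have n5 : a ≠ '5' := by rintro rfl; revert h; decide
  have n6 : a ≠ '6' := by rintro rfl; revert h; decide
  have n7 : a ≠ '7' := by rintro rfl; revert h; decide
  have n8 : a ≠ '8' := by rintro rfl; revert h; decide
  have n9 : a ≠ '9' := by rintro rfl; revert h; decide
  simp [hieuScan, hieuMap, ← String.toList_inj, n0, n1, n2, n3, n4, n5, n6, n7, n8, n9]

-- the scan returns -1 on any string of length ≥ 3 (every table entry has length 2)
theorem scan_long (a b e : Char) (rest : List Char) :
    hieuScan (String.ofList (a :: b :: e :: rest)) hieuMap = -1 := by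
  simp [hieuScan, hieuMap, ← String.toList_inj]

theorem main_eq (l : List Char) : hieu (String.ofList l) = hieu_alt (String.ofList l) := by
  match l with
  | [] => decide
  | [c] =>
    by_cases hsign : c = '+' ∨ c = '-'
    · rcases hsign with rfl | rfl <;> decide
    · push Not at hsign
      have hz : hieu (String.ofList [c]) = hieuScan (String.ofList ['0', c]) hieuMap := by
        simp [hieu, PySem.Str.zfill, PySem.Chars.zfill, hsign.1, hsign.2]
      rw [hz]
      by_cases hd : PySem.Chars.isdigit c = true
      · rcases isdigit_elim c hd with rfl|rfl|rfl|rfl|rfl|rfl|rfl|rfl|rfl|rfl <;> decide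
      · rw [scan_snd_not_digit _ _ (by simpa using hd)]
        simp [hieu_alt, eq_false_of_ne_true hd]
  | [c, d] =>
    have hz : hieu (String.ofList [c, d]) = hieuScan (String.ofList [c, d]) hieuMap := by
      simp [hieu, PySem.Str.zfill, PySem.Chars.zfill]
    rw [hz]
    by_cases hc : PySem.Chars.isdigit c = true
    · by_cases hd : PySem.Chars.isdigit d = true
      · rcases isdigit_elim c hc with rfl|rfl|rfl|rfl|rfl|rfl|rfl|rfl|rfl|rfl <;>
          rcases isdigit_elim d hd with rfl|rfl|rfl|rfl|rfl|rfl|rfl|rfl|rfl|rfl <;> decide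
      · rw [scan_snd_not_digit _ _ (by simpa using hd)]
        simp [hieu_alt, eq_false_of_ne_true hd]
    · rw [scan_fst_not_digit _ _ (by simpa using hc)]
      simp [hieu_alt, eq_false_of_ne_true hc]
  | a :: b :: e :: rest =>
    have hz : hieu (String.ofList (a :: b :: e :: rest)) =
        hieuScan (String.ofList (a :: b :: e :: rest)) hieuMap := by
      simp [hieu, PySem.Str.zfill, PySem.Chars.zfill]
    rw [hz, scan_long]
    simp [hieu_alt]

-- ===== VERDICT (by name: the statement is the Claim_ definition above) =====
theorem hieu_spec : Claim_equal_hieu := by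
  intro pair _
  unfold Spec_hieu
  have h := main_eq pair.toList
  simpa using h
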